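-- pv_equiv track=rewrite | github.com/DeepakPandey2005/Python-Toc | prac6.py | checkDivBy2
-- ===== SOURCE A (Python) =====
-- def checkDivBy2(input_str):
--     state='q0'
--     for digit in input_str:
--         if state=='q0':
--             if digit in '02468':
--                 state='q0'
--             elif digit in '13579':
--                 state='q1'
--             else:
--                 return False
--
--         elif state=='q1':
--             if digit in '02468':
--                 state='q0'
--             elif digit in '13579':
--                 state='q1'
--             else:
--                 return False
--     return state=='q0'
-- ===== SOURCE B (Python) =====
-- def checkDivBy2(input_str):
--     return all(c in '0123456789' for c in input_str) and (not input_str or input_str[-1] in '02468')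
-- ===== Notes on version B (the rewrite author's own statement) =====
-- stated objective: simpler
-- what changed: Replaced the explicit DFA state machine (state variable and per-state transition branches) by a direct characterization: all characters are digits and the string is empty or its last digit is even.
import Mathlib
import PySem

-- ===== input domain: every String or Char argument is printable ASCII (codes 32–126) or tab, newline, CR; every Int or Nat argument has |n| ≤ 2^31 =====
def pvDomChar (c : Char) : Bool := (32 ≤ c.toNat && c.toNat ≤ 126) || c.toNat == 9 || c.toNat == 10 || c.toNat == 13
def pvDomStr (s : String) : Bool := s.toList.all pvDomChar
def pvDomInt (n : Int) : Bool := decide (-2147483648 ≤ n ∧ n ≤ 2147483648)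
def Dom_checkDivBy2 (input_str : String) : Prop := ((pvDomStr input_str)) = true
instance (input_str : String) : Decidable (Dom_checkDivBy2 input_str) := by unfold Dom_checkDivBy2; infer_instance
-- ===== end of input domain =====

-- B replaces A's explicit DFA state machine by a direct characterization (all digits ∧ last digit even); simpler, same O(n).

-- ===== PORT A =====
-- the for-loop with the mutable `state` string and early `return False`
def checkDivBy2Loop : List Char → String → Bool
  | [], state => state == "q0"
  | d :: rest, state =>
    if state == "q0" then
      if ("02468".toList).contains d then checkDivBy2Loop rest "q0"
      else if ("13579".toList).contains d then checkDivBy2Loop rest "q1"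
      else false
    else if state == "q1" then
      if ("02468".toList).contains d then checkDivBy2Loop rest "q0"
      else if ("13579".toList).contains d then checkDivBy2Loop rest "q1"
      else false
    else checkDivBy2Loop rest state

def checkDivBy2 (input_str : String) : Bool :=
  checkDivBy2Loop input_str.toList "q0"

-- ===== PORT B =====
def checkDivBy2_alt (input_str : String) : Bool :=
  (input_str.toList.all (fun c => ("0123456789".toList).contains c)) &&
    (input_str.toList.isEmpty ||
      (match input_str.toList.getLast? with
       | some c => ("02468".toList).contains c
       | none => false))

-- ===== PRECONDITION & SPEC =====
def Spec_checkDivBy2 (input_str : String) (out : Bool) : Prop := out = checkDivBy2_alt input_str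
instance (input_str : String) (out : Bool) : Decidable (Spec_checkDivBy2 input_str out) := by unfold Spec_checkDivBy2; infer_instance

-- ===== CLAIM (what is proved, stated in full; the proofs are below) =====
def Claim_equal_checkDivBy2 : Prop := ∀ (input_str : String), Dom_checkDivBy2 input_str → Spec_checkDivBy2 input_str (checkDivBy2 input_str)

-- ===== LEMMAS AND PROOFS =====

-- digit = even-digit or odd-digit, as characters
theorem digit_split (d : Char) :
    ("0123456789".toList).contains d =
      ((("02468".toList).contains d) || (("13579".toList).contains d)) := by
  have h1 : "0123456789".toList = ['0','1','2','3','4','5','6','7','8','9'] := by decide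
  have h2 : "02468".toList = ['0','2','4','6','8'] := by decide
  have h3 : "13579".toList = ['1','3','5','7','9'] := by decide
  rw [h1, h2, h3, Bool.eq_iff_iff]
  simp only [List.contains_eq_mem, Bool.or_eq_true, decide_eq_true_eq, List.mem_cons,
    List.not_mem_nil, or_false]
  tauto

-- characterization of A's loop, for either live state
theorem checkDivBy2Loop_char (l : List Char) (st : String) (hst : st = "q0" ∨ st = "q1") :
    checkDivBy2Loop l st =
      ((l.all (fun c => ("0123456789".toList).contains c)) &&
        (match l.getLast? with
         | some c => ("02468".toList).contains c
         | none => st == "q0")) := by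
  induction l generalizing st with
  | nil =>
    simp [checkDivBy2Loop]
  | cons d rest ih =>
    have hstep : checkDivBy2Loop (d :: rest) st =
        (if ("02468".toList).contains d then checkDivBy2Loop rest "q0"
         else if ("13579".toList).contains d then checkDivBy2Loop rest "q1"
         else false) := by
      rcases hst with h | h <;> subst h <;> simp [checkDivBy2Loop]
    rw [hstep]
    by_cases heven : ("02468".toList).contains d = true
    · have hd : ("0123456789".toList).contains d = true := by
        rw [digit_split, heven]; rfl
      rw [if_pos heven, ih "q0" (Or.inl rfl)]
      cases rest with
      | nil =>
        simp only [List.all_nil, List.all_cons, List.getLast?_nil, List.getLast?_singleton,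
          hd, heven, Bool.and_true, Bool.true_and]
        rfl
      | cons e es =>
        cases h : (e :: es).getLast? with
        | none => exact absurd h (by simp)
        | some c =>
          simp only [List.getLast?_cons_cons, h, List.all_cons, hd, Bool.true_and]
    · rw [if_neg heven]
      have heven' : ("02468".toList).contains d = false := by
        simpa using heven
      by_cases hodd : ("13579".toList).contains d = true
      · have hd : ("0123456789".toList).contains d = true := by
          rw [digit_split, heven', hodd]; rfl
        rw [if_pos hodd, ih "q1" (Or.inr rfl)]
        cases rest with
        | nil =>
          simp only [List.all_nil, List.all_cons, List.getLast?_nil, List.getLast?_singleton,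
            hd, heven', Bool.and_true, Bool.true_and, Bool.and_false]
          rfl
        | cons e es =>
          cases h : (e :: es).getLast? with
          | none => exact absurd h (by simp)
          | some c =>
            simp only [List.getLast?_cons_cons, h, List.all_cons, hd, Bool.true_and]
      · rw [if_neg hodd]
        have hodd' : ("13579".toList).contains d = false := by
          simpa using hodd
        have hd : ("0123456789".toList).contains d = false := by
          rw [digit_split, heven', hodd']; rfl
        simp only [List.all_cons, hd, Bool.false_and]

-- ===== VERDICT (by name: the statement is the Claim_ definition above) =====
theorem checkDivBy2_spec : Claim_equal_checkDivBy2 := by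
  intro s _
  unfold Spec_checkDivBy2 checkDivBy2 checkDivBy2_alt
  rw [checkDivBy2Loop_char _ _ (Or.inl rfl)]
  cases h : s.toList.getLast? with
  | none =>
    have hnil : s.toList = [] := List.getLast?_eq_none_iff.mp h
    simp [hnil]
  | some c =>
    have hne : s.toList.isEmpty = false := by
      cases hl : s.toList with
      | nil => rw [hl] at h; simp at h
      | cons x xs => simp
    simp only [hne, Bool.false_or]
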